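-- pv_equiv track=rewrite | github.com/davidar/oeisdata | verified/prog/Python/A003/A003016.py | A003016
-- ===== SOURCE A (Python) =====
-- from math import isqrt # requires python3.8 or higher
--
-- def A003016(n):
--     if n < 4: return[0,3,1,2][n]
--     cnt = k = 2; r = isqrt(2*n)+1; C = r*(r-1)//2
--     while True:
--        while C < n and k < r//2:
--           C *= r-k; k += 1; C //= k
--        if C == n: cnt += 2 - (r == 2*k)
--        if k >= r//2: return cnt
--        C *= r-k; C //= r; r -= 1 # _M. F. Hasler_, Feb 16 2023
-- ===== SOURCE B (Python) =====
-- from math import isqrt, comb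
--
-- def A003016(n):
--     if n < 0:
--         return 0
--     if n < 4:
--         return (0, 3, 1, 2)[n]
--     cnt = 2
--     k = 2
--     while comb(2 * k, k) <= n:
--         lo, hi = 2 * k, n
--         while lo < hi:
--             mid = (lo + hi) // 2
--             if comb(mid, k) < n:
--                 lo = mid + 1
--             else:
--                 hi = mid
--         if comb(lo, k) == n:
--             cnt += 1 if lo == 2 * k else 2
--         k += 1
--     return cnt
-- ===== Notes on version B (the rewrite author's own statement) =====
-- stated objective: faster
-- what changed: A's single descending two-pointer sweep over rows (maintaining C(r,k) incrementally, O(sqrt n) steps) is replaced by a per-column loop: for each k>=2 with C(2k,k)<=n, binary-search the unique row r>=2k with C(r,k)=n, counting 2 (or 1 on the central diagonal r=2k).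
-- intended difference: For n in {-3,-2,-1} A returns a positive entry of its lookup table selected by Python's negative-index wraparound (at the witness n=-3 it returns 3), while B returns 0, the intended count of occurrences of a negative n in Pascal's triangle. — e.g. on A003016(-3): A returns 3, B returns 0
-- outside the precondition, e.g. on A003016(-5): A raises IndexError, B returns 0
import Mathlib
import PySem

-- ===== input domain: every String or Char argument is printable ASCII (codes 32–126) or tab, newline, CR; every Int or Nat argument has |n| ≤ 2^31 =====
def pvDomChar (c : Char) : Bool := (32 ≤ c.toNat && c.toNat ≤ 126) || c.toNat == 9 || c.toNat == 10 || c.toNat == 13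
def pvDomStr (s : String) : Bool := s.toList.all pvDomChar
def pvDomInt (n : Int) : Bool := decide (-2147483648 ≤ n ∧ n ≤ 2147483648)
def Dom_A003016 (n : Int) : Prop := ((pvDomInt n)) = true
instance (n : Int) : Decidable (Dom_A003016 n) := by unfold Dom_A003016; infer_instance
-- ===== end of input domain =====

-- B replaces A's descending two-pointer sweep over Pascal's triangle by a per-column
-- binary search (for each k with C(2k,k) <= n, find the unique r with C(r,k) = n);
-- objective: faster.  For n in {-3,-2,-1} A's negative-index wraparound is replaced
-- by the intended value 0 (see D_A003016); for n <= -5 A raises IndexError, B returns 0.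


-- ===== PORT A =====
-- math.isqrt on a nonnegative argument is exactly Nat.sqrt (exact here: only called with 2*n ≥ 8)
def isqrtZ (m : Int) : Int := (Nat.sqrt m.toNat : Int)

-- the inner 'while C < n and k < r//2' loop; returns the final (k, C).
-- The Nat argument is fuel making the loop total; every call site passes enough of it.
def innerA (n r : Int) : Int → Int → Nat → Int × Int
  | k, C, 0 => (k, C)
  | k, C, fuel + 1 =>
    if C < n ∧ k < PySem.Int.floordiv r 2 then
      innerA n r (k + 1) (PySem.Int.floordiv (C * (r - k)) (k + 1)) fuel
    else (k, C)

-- the outer 'while True' loop of A (the 'if C == n' update is written at both exits); fueled likewise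
def outerA (n : Int) : Int → Int → Int → Int → Nat → Int
  | cnt, _, _, _, 0 => cnt
  | cnt, k, r, C, fuel + 1 =>
    if PySem.Int.floordiv r 2 ≤ (innerA n r k C (r.toNat + 1)).1 then
      (if (innerA n r k C (r.toNat + 1)).2 = n then
         cnt + (2 - (if r = 2 * (innerA n r k C (r.toNat + 1)).1 then (1 : Int) else 0))
       else cnt)
    else
      outerA n
        (if (innerA n r k C (r.toNat + 1)).2 = n then
           cnt + (2 - (if r = 2 * (innerA n r k C (r.toNat + 1)).1 then (1 : Int) else 0))
         else cnt)
        ((innerA n r k C (r.toNat + 1)).1) (r - 1)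
        (PySem.Int.floordiv ((innerA n r k C (r.toNat + 1)).2 * (r - (innerA n r k C (r.toNat + 1)).1)) r)
        fuel

def A003016 (n : Int) : Int :=
  if n < 4 then (PySem.List.pyGet? [0, 3, 1, 2] n).getD 0
  else
    outerA n 2 2 (isqrtZ (2 * n) + 1)
      (PySem.Int.floordiv ((isqrtZ (2 * n) + 1) * ((isqrtZ (2 * n) + 1) - 1)) 2)
      ((isqrtZ (2 * n) + 1).toNat + 1)

-- ===== PORT B =====
-- math.comb (both arguments nonnegative wherever B calls it)
def combZ (r k : Int) : Int := ((r.toNat).choose k.toNat : Int)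

-- binary search: least r in [lo, hi] with comb(r, k) ≥ n (given comb(hi, k) ≥ n); fueled likewise
def bsearchB (n k : Int) : Int → Int → Nat → Int
  | lo, _, 0 => lo
  | lo, hi, fuel + 1 =>
    if lo < hi then
      if combZ (PySem.Int.floordiv (lo + hi) 2) k < n then
        bsearchB n k (PySem.Int.floordiv (lo + hi) 2 + 1) hi fuel
      else
        bsearchB n k lo (PySem.Int.floordiv (lo + hi) 2) fuel
    else lo

-- the per-column loop of B; fueled likewise
def loopB (n : Int) : Int → Int → Nat → Int
  | _, cnt, 0 => cnt
  | k, cnt, fuel + 1 =>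
    if combZ (2 * k) k ≤ n then
      loopB n (k + 1)
        (if combZ (bsearchB n k (2 * k) n ((n - 2 * k).toNat + 1)) k = n then
           cnt + (if bsearchB n k (2 * k) n ((n - 2 * k).toNat + 1) = 2 * k then (1 : Int) else 2)
         else cnt)
        fuel
    else cnt

def A003016_alt (n : Int) : Int :=
  if n < 0 then 0
  else if n < 4 then (PySem.List.pyGet? [0, 3, 1, 2] n).getD 0
  else loopB n 2 2 (n.toNat + 1)

-- ===== PRECONDITION & SPEC =====
-- Pre_ excludes exactly n ≤ -5, where A raises IndexError (negative table index out of range).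
def Pre_A003016 (n : Int) : Prop := -4 ≤ n
instance (n : Int) : Decidable (Pre_A003016 n) := by unfold Pre_A003016; infer_instance
def pvWitness_A003016 : Int := 10

-- For n in {-3,-2,-1} A returns a positive entry of its lookup table selected by Python's
-- negative-index wraparound, while B returns 0, the intended count of n in Pascal's triangle.
def D_A003016 (n : Int) : Prop := -3 ≤ n ∧ n ≤ -1
instance (n : Int) : Decidable (D_A003016 n) := by unfold D_A003016; infer_instance

def Spec_A003016 (n : Int) (out : Int) : Prop := ¬ D_A003016 n → out = A003016_alt n
instance (n : Int) (out : Int) : Decidable (Spec_A003016 n out) := by unfold Spec_A003016; infer_instance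

def pvDiffWitness_A003016 : Int := -3
def pvDiffWitnessOut_A003016 : Int × Int := (3, 0)

-- ===== CLAIM (what is proved, stated in full; the proofs are below) =====
def Claim_unchanged_A003016 : Prop := ∀ (n : Int), Dom_A003016 n → Pre_A003016 n → Spec_A003016 n (A003016 n)
def Claim_changed_A003016 : Prop := Dom_A003016 (pvDiffWitness_A003016) ∧ Pre_A003016 (pvDiffWitness_A003016) ∧ D_A003016 (pvDiffWitness_A003016) ∧ A003016 (pvDiffWitness_A003016) = pvDiffWitnessOut_A003016.1 ∧ A003016_alt (pvDiffWitness_A003016) = pvDiffWitnessOut_A003016.2 ∧ pvDiffWitnessOut_A003016.1 ≠ pvDiffWitnessOut_A003016.2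
def Claim_exact_A003016 : Prop := ∀ (n : Int), Dom_A003016 n → Pre_A003016 n → D_A003016 n → A003016 n ≠ A003016_alt n

-- ===== LEMMAS AND PROOFS =====

theorem nat_choose_k_step {m k : ℕ} (h : 2 * k + 2 ≤ m) : m.choose k < m.choose (k + 1) := by
  have e := Nat.choose_succ_right_eq m k
  have hpos : 0 < m.choose k := Nat.choose_pos (by omega)
  have hsub : k + 2 ≤ m - k := by omega
  nlinarith [Nat.mul_le_mul_left (m.choose k) hsub]

theorem nat_choose_k_mono {m a b : ℕ} (hab : a ≤ b) (h : 2 * b ≤ m) :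
    m.choose a ≤ m.choose b := by
  induction b with
  | zero =>
    have ha : a = 0 := by omega
    subst ha; exact le_rfl
  | succ c ih =>
    rcases Nat.lt_or_ge a (c + 1) with hlt | hge
    · exact le_trans (ih (by omega) (by omega)) (le_of_lt (nat_choose_k_step (by omega)))
    · have : a = c + 1 := by omega
      subst this; exact le_rfl

-- ---- arithmetic facts about Int-level binomial coefficients ----

theorem combZ_r_mono {k r r' : Int} (h : r ≤ r') : combZ r k ≤ combZ r' k := by
  unfold combZ
  exact_mod_cast Nat.choose_le_choose _ (Int.toNat_le_toNat h)

theorem combZ_r_strict {k r r' : Int} (hk : 1 ≤ k) (hkr : k ≤ r) (h : r < r') :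
    combZ r k < combZ r' k := by
  have h1 : combZ r k < combZ (r + 1) k := by
    have hm : (r + 1).toNat = r.toNat + 1 := by omega
    have hj : k.toNat = (k.toNat - 1) + 1 := by omega
    unfold combZ
    rw [hm, hj, Nat.choose_succ_succ]
    have hp : 0 < r.toNat.choose (k.toNat - 1) := Nat.choose_pos (by omega)
    simp only [Nat.succ_eq_add_one]
    push_cast
    omega
  exact lt_of_lt_of_le h1 (combZ_r_mono (by omega))

theorem combZ_k_mono {r a b : Int} (h0 : 0 ≤ a) (hab : a ≤ b) (h : 2 * b ≤ r) :
    combZ r a ≤ combZ r b := by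
  have := nat_choose_k_mono (m := r.toNat) (a := a.toNat) (b := b.toNat) (by omega) (by omega)
  unfold combZ
  exact_mod_cast this

theorem combZ_k_strict {r a b : Int} (h0 : 0 ≤ a) (hab : a < b) (h : 2 * b ≤ r) :
    combZ r a < combZ r b := by
  have h1 : r.toNat.choose a.toNat < r.toNat.choose (a.toNat + 1) := nat_choose_k_step (by omega)
  have h2 : r.toNat.choose (a.toNat + 1) ≤ r.toNat.choose b.toNat :=
    nat_choose_k_mono (by omega) (by omega)
  unfold combZ
  exact_mod_cast lt_of_lt_of_le h1 h2

theorem nat_central_mono (m d : ℕ) : (2 * m).choose m ≤ (2 * (m + d)).choose (m + d) := by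
  induction d with
  | zero => simp
  | succ c ih =>
    have key : (2 * (m + c)).choose (m + c) ≤ (2 * (m + c + 1)).choose (m + c + 1) := by
      have e : 2 * (m + c + 1) = (2 * (m + c) + 1) + 1 := by ring
      rw [e, show m + c + 1 = (m + c) + 1 from rfl, Nat.choose_succ_succ]
      have := Nat.choose_le_choose (m + c) (show 2 * (m + c) ≤ 2 * (m + c) + 1 by omega)
      omega
    exact le_trans ih (by rw [show m + (c + 1) = m + c + 1 from rfl]; exact key)

theorem combZ_central_mono {a b : Int} (h0 : 0 ≤ a) (hab : a ≤ b) :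
    combZ (2 * a) a ≤ combZ (2 * b) b := by
  have h2a : (2 * a).toNat = 2 * a.toNat := by omega
  have h2b : (2 * b).toNat = 2 * b.toNat := by omega
  have hd : b.toNat = a.toNat + (b.toNat - a.toNat) := by omega
  have := nat_central_mono a.toNat (b.toNat - a.toNat)
  rw [← hd] at this
  unfold combZ
  rw [h2a, h2b]
  exact_mod_cast this

theorem combZ_one {r : Int} (h : 0 ≤ r) : combZ r 1 = r := by
  unfold combZ
  rw [show (1 : Int).toNat = 1 from rfl, Nat.choose_one_right]
  omega

theorem nat_choose_two (m : ℕ) : 2 * m.choose 2 = m * (m - 1) := by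
  induction m with
  | zero => rfl
  | succ c ih =>
    rw [show c + 1 = c.succ from rfl, show (2 : ℕ) = Nat.succ 1 from rfl, Nat.choose_succ_succ,
      Nat.choose_one_right]
    rcases c with _ | d
    · rfl
    · rw [show (2 : ℕ) = Nat.succ 1 from rfl] at ih
      simp only [Nat.succ_sub_one] at *
      nlinarith [ih]

theorem combZ_two {r : Int} (h : 0 ≤ r) : 2 * combZ r 2 = r * (r - 1) := by
  have := nat_choose_two r.toNat
  unfold combZ
  rcases (by omega : r = 0 ∨ 1 ≤ r) with h0 | h1
  · subst h0; rfl
  · have hs : (r.toNat : Int) = r := by omega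
    have hs1 : ((r.toNat - 1 : ℕ) : Int) = r - 1 := by omega
    rw [show (2 : Int).toNat = 2 from rfl]
    calc 2 * (r.toNat.choose 2 : Int) = ((2 * r.toNat.choose 2 : ℕ) : Int) := by push_cast; ring
      _ = ((r.toNat * (r.toNat - 1) : ℕ) : Int) := by rw [this]
      _ = r * (r - 1) := by rw [Nat.cast_mul, hs, hs1]

theorem combZ_succ_right {r k : Int} (h0 : 0 ≤ k) (h : k < r) :
    combZ r k * (r - k) = combZ r (k + 1) * (k + 1) := by
  have e := Nat.choose_succ_right_eq r.toNat k.toNat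
  have h1 : (k + 1).toNat = k.toNat + 1 := by omega
  have h2 : ((r.toNat - k.toNat : ℕ) : Int) = r - k := by omega
  have h3 : ((k.toNat + 1 : ℕ) : Int) = k + 1 := by omega
  unfold combZ
  rw [h1]
  calc (r.toNat.choose k.toNat : Int) * (r - k)
      = (r.toNat.choose k.toNat : Int) * ((r.toNat - k.toNat : ℕ) : Int) := by rw [h2]
    _ = ((r.toNat.choose k.toNat * (r.toNat - k.toNat) : ℕ) : Int) := by push_cast; ring
    _ = ((r.toNat.choose (k.toNat + 1) * (k.toNat + 1) : ℕ) : Int) := by rw [e]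
    _ = (r.toNat.choose (k.toNat + 1) : Int) * (k + 1) := by rw [Nat.cast_mul, h3]

theorem combZ_row {r k : Int} (h0 : 0 ≤ k) (h : k < r) :
    combZ r k * (r - k) = combZ (r - 1) k * r := by
  have e := Nat.choose_mul_succ_eq (r.toNat - 1) k.toNat
  have h1 : r.toNat - 1 + 1 = r.toNat := by omega
  rw [h1] at e
  have h2 : (r - 1).toNat = r.toNat - 1 := by omega
  have h3 : ((r.toNat - k.toNat : ℕ) : Int) = r - k := by omega
  have h4 : ((r.toNat : ℕ) : Int) = r := by omega
  unfold combZ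
  rw [h2]
  calc (r.toNat.choose k.toNat : Int) * (r - k)
      = ((r.toNat.choose k.toNat * (r.toNat - k.toNat) : ℕ) : Int) := by
        rw [← h3]; push_cast; ring
    _ = (((r.toNat - 1).choose k.toNat * r.toNat : ℕ) : Int) := by rw [← e]
    _ = ((r.toNat - 1).choose k.toNat : Int) * r := by push_cast; rw [h4]

theorem nat_L1 {m : ℕ} (hm : 3 ≤ m) : (2 * m).choose m ≤ (2 * m + 1).choose (m - 1) := by
  have e1 := Nat.choose_succ_right_eq (2 * m + 1) (m - 1)
  rw [show m - 1 + 1 = m by omega, show 2 * m + 1 - (m - 1) = m + 2 by omega] at e1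
  -- e1 : (2m+1).choose m * m = (2m+1).choose (m-1) * (m+2)
  have e2 := Nat.choose_mul_succ_eq (2 * m) m
  rw [show 2 * m + 1 - m = m + 1 by omega] at e2
  -- e2 : (2m).choose m * (2m+1) = (2m+1).choose m * (m+1)
  have key : (2 * m + 1).choose (m - 1) * ((m + 2) * (m + 1)) =
      (2 * m).choose m * ((2 * m + 1) * m) := by
    calc (2 * m + 1).choose (m - 1) * ((m + 2) * (m + 1))
        = ((2 * m + 1).choose (m - 1) * (m + 2)) * (m + 1) := by ring
      _ = ((2 * m + 1).choose m * m) * (m + 1) := by rw [← e1]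
      _ = ((2 * m + 1).choose m * (m + 1)) * m := by ring
      _ = ((2 * m).choose m * (2 * m + 1)) * m := by rw [← e2]
      _ = (2 * m).choose m * ((2 * m + 1) * m) := by ring
  have hineq : (m + 2) * (m + 1) ≤ (2 * m + 1) * m := by nlinarith
  have step : (2 * m).choose m * ((m + 2) * (m + 1)) ≤
      (2 * m + 1).choose (m - 1) * ((m + 2) * (m + 1)) := by
    calc (2 * m).choose m * ((m + 2) * (m + 1)) ≤ (2 * m).choose m * ((2 * m + 1) * m) :=
          Nat.mul_le_mul_left _ hineq
      _ = (2 * m + 1).choose (m - 1) * ((m + 2) * (m + 1)) := key.symm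
  exact Nat.le_of_mul_le_mul_right step (by positivity)

theorem combZ_L1 {k : Int} (h : 3 ≤ k) : combZ (2 * k) k ≤ combZ (2 * k + 1) (k - 1) := by
  have h1 : (2 * k).toNat = 2 * k.toNat := by omega
  have h2 : (2 * k + 1).toNat = 2 * k.toNat + 1 := by omega
  have h3 : (k - 1).toNat = k.toNat - 1 := by omega
  have := nat_L1 (m := k.toNat) (by omega)
  unfold combZ
  rw [h1, h2, h3]
  exact_mod_cast this

-- ---- the common counting spec: weighted solution counts by column and row ----

-- weight of an entry (2 in general, 1 on the central diagonal), 0 if not a solution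
def rowT (n r k : Int) : Int := if combZ r k = n then (if r = 2 * k then 1 else 2) else 0
-- solutions in column k among the m rows 2k, 2k+1, …, 2k+m-1
def colS (n k : Int) : Nat → Int
  | 0 => 0
  | m + 1 => colS n k m + rowT n (2 * k + (m : Int)) k
-- solutions in the c columns k, k+1, …, k+c-1, rows from 2·column up to r
def remW (n r k : Int) : Nat → Int
  | 0 => 0
  | c + 1 => colS n k ((r - 2 * k + 1).toNat) + remW n r (k + 1) c

theorem colS_zero {n k : Int} {m : Nat}
    (h : ∀ i : Nat, i < m → rowT n (2 * k + (i : Int)) k = 0) : colS n k m = 0 := by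
  induction m with
  | zero => rfl
  | succ c ih =>
    have h1 : colS n k c = 0 := ih (fun i hi => h i (by omega))
    simp [colS, h1, h c (by omega)]

theorem colS_single {n k x : Int} {m : Nat} (hx1 : 2 * k ≤ x) (hx2 : x < 2 * k + (m : Int))
    (h : ∀ r' : Int, 2 * k ≤ r' → r' < 2 * k + (m : Int) → r' ≠ x → rowT n r' k = 0) :
    colS n k m = rowT n x k := by
  induction m with
  | zero => simp at hx2; omega
  | succ c ih =>
    by_cases hc : x = 2 * k + (c : Int)
    · have h0 : colS n k c = 0 := colS_zero (fun i hi => by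
        refine h (2 * k + (i : Int)) (by omega) (by push_cast; omega) (by omega))
      rw [colS, h0, ← hc]
      ring
    · have htop : rowT n (2 * k + (c : Int)) k = 0 :=
        h (2 * k + (c : Int)) (by omega) (by push_cast; omega) (fun he => hc he.symm)
      have hx2' : x < 2 * k + (c : Int) := by push_cast at hx2; omega
      rw [colS, htop, ih hx2' (fun r' h1 h2 h3 => h r' h1 (by push_cast; push_cast at h2; omega) h3)]
      ring

theorem colS_ext {n k : Int} {m1 m2 : Nat} (h12 : m1 ≤ m2)
    (h : ∀ i : Nat, m1 ≤ i → i < m2 → rowT n (2 * k + (i : Int)) k = 0) :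
    colS n k m2 = colS n k m1 := by
  induction m2 with
  | zero => rw [show m1 = 0 by omega]
  | succ c ih =>
    rcases Nat.lt_or_ge m1 (c + 1) with hlt | hge
    · have h1 : colS n k c = colS n k m1 := ih (by omega) (fun i h1 h2 => h i h1 (by omega))
      rw [colS, h1, h c (by omega) (by omega)]
      ring
    · rw [show m1 = c + 1 by omega]

theorem remW_zero {n r k : Int} {c : Nat}
    (h : ∀ j : Nat, j < c → colS n (k + (j : Int)) ((r - 2 * (k + (j : Int)) + 1).toNat) = 0) :
    remW n r k c = 0 := by
  induction c generalizing k with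
  | zero => rfl
  | succ d ih =>
    have h0 := h 0 (by omega)
    rw [show k + ((0 : Nat) : Int) = k by push_cast; ring] at h0
    have htail : remW n r (k + 1) d = 0 := by
      refine ih (fun j hj => ?_)
      have := h (j + 1) (by omega)
      rw [show k + (((j + 1 : Nat)) : Int) = k + 1 + (j : Int) by push_cast; ring] at this
      exact this
    rw [remW, h0, htail]
    ring

theorem remW_drop {n r k : Int} {d c : Nat}
    (h : ∀ j : Nat, j < d → colS n (k + (j : Int)) ((r - 2 * (k + (j : Int)) + 1).toNat) = 0) :
    remW n r k (d + c) = remW n r (k + (d : Int)) c := by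
  induction d generalizing k with
  | zero => simp
  | succ e ih =>
    rw [show e + 1 + c = (e + c) + 1 by omega, remW]
    have h0 := h 0 (by omega)
    rw [show k + ((0 : Nat) : Int) = k by push_cast; ring] at h0
    rw [h0]
    have htail : remW n r (k + 1) (e + c) = remW n r (k + 1 + (e : Int)) c := by
      refine ih (fun j hj => ?_)
      have := h (j + 1) (by omega)
      rw [show k + (((j + 1 : Nat)) : Int) = k + 1 + (j : Int) by push_cast; ring] at this
      exact this
    rw [htail, show k + 1 + (e : Int) = k + ((e + 1 : Nat) : Int) by push_cast; ring]
    ring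

theorem colS_top {n k r : Int} (h : 2 * k ≤ r) :
    colS n k ((r - 2 * k + 1).toNat) = colS n k ((r - 1 - 2 * k + 1).toNat) + rowT n r k := by
  rw [show (r - 2 * k + 1).toNat = (r - 1 - 2 * k + 1).toNat + 1 by omega, colS,
    show 2 * k + (((r - 1 - 2 * k + 1).toNat : Nat) : Int) = r by omega]

theorem remW_top_all {n r k : Int} {c : Nat}
    (h : ∀ j : Nat, j < c → 2 * (k + (j : Int)) ≤ r → rowT n r (k + (j : Int)) = 0) :
    remW n r k c = remW n (r - 1) k c := by
  induction c generalizing k with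
  | zero => rfl
  | succ d ih =>
    have hcol : colS n k ((r - 2 * k + 1).toNat) = colS n k ((r - 1 - 2 * k + 1).toNat) := by
      by_cases hk : 2 * k ≤ r
      · have h0 := h 0 (by omega)
        rw [show k + ((0 : Nat) : Int) = k by push_cast; ring] at h0
        rw [colS_top hk, h0 hk]
        ring
      · rw [show (r - 2 * k + 1).toNat = (r - 1 - 2 * k + 1).toNat by omega]
    have htail : remW n r (k + 1) d = remW n (r - 1) (k + 1) d := by
      refine ih (fun j hj hle => ?_)
      have := h (j + 1) (by omega)
      rw [show k + (((j + 1 : Nat)) : Int) = k + 1 + (j : Int) by push_cast; ring] at this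
      exact this hle
    rw [remW, remW, hcol, htail]

-- ---- the inner while-loop of A ----

theorem innerA_spec (n r : Int) : ∀ (fuel : Nat) (k C : Int), C = combZ r k → 2 ≤ k →
    2 * k ≤ r → (∀ k', 2 ≤ k' → k' < k → combZ r k' < n) →
    (PySem.Int.floordiv r 2 - k).toNat < fuel →
    (innerA n r k C fuel).2 = combZ r (innerA n r k C fuel).1 ∧
    k ≤ (innerA n r k C fuel).1 ∧ 2 * (innerA n r k C fuel).1 ≤ r ∧
    (∀ k', 2 ≤ k' → k' < (innerA n r k C fuel).1 → combZ r k' < n) ∧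
    (n ≤ (innerA n r k C fuel).2 ∨ PySem.Int.floordiv r 2 ≤ (innerA n r k C fuel).1) := by
  have hfd : PySem.Int.floordiv r 2 = r / 2 := PySem.Int.floordiv_eq_ediv_of_pos (by norm_num)
  intro fuel
  induction fuel with
  | zero => intro k C _ _ _ _ hf; omega
  | succ f ih =>
    intro k C hC hk2 hkr hJ3 hf
    by_cases hg : C < n ∧ k < PySem.Int.floordiv r 2
    · have e : innerA n r k C (f + 1)
          = innerA n r (k + 1) (PySem.Int.floordiv (C * (r - k)) (k + 1)) f := by
      -- one step of the loop
        have e0 : innerA n r k C (f + 1)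
            = if C < n ∧ k < PySem.Int.floordiv r 2 then
                innerA n r (k + 1) (PySem.Int.floordiv (C * (r - k)) (k + 1)) f
              else (k, C) := rfl
        rw [e0, if_pos hg]
      have hkr' : 2 * (k + 1) ≤ r := by rw [hfd] at hg; omega
      have hklt : k < r := by omega
      have hC' : PySem.Int.floordiv (C * (r - k)) (k + 1) = combZ r (k + 1) := by
        rw [PySem.Int.floordiv_eq_ediv_of_pos (by omega : (0 : Int) < k + 1), hC,
          combZ_succ_right (by omega) hklt]
        exact Int.mul_ediv_cancel _ (by omega)
      have hJ3' : ∀ k', 2 ≤ k' → k' < k + 1 → combZ r k' < n := by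
        intro k' h2 hlt
        rcases (by omega : k' < k ∨ k' = k) with h | h
        · exact hJ3 k' h2 h
        · subst h; rw [← hC]; exact hg.1
      rw [e]
      obtain ⟨a1, a2, a3, a4, a5⟩ := ih (k + 1) _ hC' (by omega) hkr' hJ3' (by omega)
      exact ⟨a1, by omega, a3, a4, a5⟩
    · have e : innerA n r k C (f + 1) = (k, C) := by
        have e0 : innerA n r k C (f + 1)
            = if C < n ∧ k < PySem.Int.floordiv r 2 then
                innerA n r (k + 1) (PySem.Int.floordiv (C * (r - k)) (k + 1)) f
              else (k, C) := rfl
        rw [e0, if_neg hg]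
      rw [e]
      refine ⟨hC, le_refl _, hkr, hJ3, ?_⟩
      rw [not_and_or] at hg
      rcases hg with h | h
      · left; omega
      · right; omega

-- ---- the outer while-loop of A counts the remaining weighted solutions ----

theorem outerA_spec (n : Int) (hn : 8 ≤ n) : ∀ (fuel : Nat) (cnt k r C : Int),
    C = combZ r k → 2 ≤ k → 2 * k ≤ r → r ≤ n →
    (∀ k', 2 ≤ k' → k' < k → combZ r k' < n) → (r - 2 * k).toNat < fuel →
    outerA n cnt k r C fuel = cnt + remW n r k ((PySem.Int.floordiv n 2 - k + 1).toNat) := by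
  have hfdn : PySem.Int.floordiv n 2 = n / 2 := PySem.Int.floordiv_eq_ediv_of_pos (by norm_num)
  intro fuel
  induction fuel with
  | zero => intro cnt k r C _ _ _ _ _ hf; omega
  | succ f ih =>
    intro cnt k r C hC hk2 hkr hrn hJ3 hf
    have hfdr : PySem.Int.floordiv r 2 = r / 2 := PySem.Int.floordiv_eq_ediv_of_pos (by norm_num)
    have e : outerA n cnt k r C (f + 1)
        = if PySem.Int.floordiv r 2 ≤ (innerA n r k C (r.toNat + 1)).1 then
            (if (innerA n r k C (r.toNat + 1)).2 = n then
               cnt + (2 - (if r = 2 * (innerA n r k C (r.toNat + 1)).1 then (1 : Int) else 0))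
             else cnt)
          else
            outerA n
              (if (innerA n r k C (r.toNat + 1)).2 = n then
                 cnt + (2 - (if r = 2 * (innerA n r k C (r.toNat + 1)).1 then (1 : Int) else 0))
               else cnt)
              ((innerA n r k C (r.toNat + 1)).1) (r - 1)
              (PySem.Int.floordiv ((innerA n r k C (r.toNat + 1)).2
                * (r - (innerA n r k C (r.toNat + 1)).1)) r)
              f := rfl
    have hs := innerA_spec n r (r.toNat + 1) k C hC hk2 hkr hJ3 (by rw [hfdr]; omega)
    rcases hp : innerA n r k C (r.toNat + 1) with ⟨k', C'⟩
    rw [hp] at hs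
    obtain ⟨hC', hkk', h2k', hJ3', hexit⟩ := hs
    simp only at hC' hkk' h2k' hJ3' hexit
    have hcnt : (if C' = n then cnt + (2 - (if r = 2 * k' then (1 : Int) else 0)) else cnt)
        = cnt + rowT n r k' := by
      unfold rowT
      rw [← hC']
      split_ifs <;> ring
    -- the prefix of columns k ≤ j < k' holds no solution in rows ≤ r
    have hdropcol : ∀ j : Nat, (j : Int) < k' - k →
        colS n (k + (j : Int)) ((r - 2 * (k + (j : Int)) + 1).toNat) = 0 := by
      intro j hj
      refine colS_zero (fun i hi => ?_)
      have hrow : 2 * (k + (j : Int)) + (i : Int) ≤ r := by omega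
      have hlt : combZ (2 * (k + (j : Int)) + (i : Int)) (k + (j : Int)) < n :=
        lt_of_le_of_lt (combZ_r_mono hrow) (hJ3' (k + (j : Int)) (by omega) (by omega))
      simp [rowT, hlt.ne]
    rw [e, hp]
    simp only
    by_cases hret : PySem.Int.floordiv r 2 ≤ k'
    · rw [if_pos hret, hcnt]
      rw [hfdr] at hret
      have hre : r = 2 * k' ∨ r = 2 * k' + 1 := by omega
      have hk'n : 2 * k' ≤ n := by omega
      -- remW n r k c = rowT n r k'
      have hcsplit : ((PySem.Int.floordiv n 2 - k + 1).toNat)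
          = (k' - k).toNat + ((n / 2 - k').toNat + 1) := by rw [hfdn]; omega
      rw [hcsplit, remW_drop (fun j hj => hdropcol j (by omega)),
        show k + (((k' - k).toNat : Nat) : Int) = k' by omega, remW]
      have htail : remW n r (k' + 1) ((n / 2 - k').toNat) = 0 := by
        refine remW_zero (fun j hj => ?_)
        rw [show (r - 2 * (k' + 1 + (j : Int)) + 1).toNat = 0 by omega]
        rfl
      rcases hre with he | he
      · rw [htail, show (r - 2 * k' + 1).toNat = 1 by omega]
        have e1 : colS n k' 1 = 0 + rowT n (2 * k' + ((0 : Nat) : Int)) k' := rfl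
        rw [e1, show 2 * k' + ((0 : Nat) : Int) = r by push_cast; omega]
        ring
      · rw [htail, show (r - 2 * k' + 1).toNat = 2 by omega]
        have hmid : rowT n (2 * k' + ((0 : Nat) : Int)) k' = 0 := by
          have hne : combZ (2 * k') k' ≠ n := by
            rcases (by omega : k' = 2 ∨ 3 ≤ k') with h2 | h3
            · subst h2
              rw [show combZ (2 * (2 : Int)) 2 = 6 from by decide]
              omega
            · have h1 := hJ3' (k' - 1) (by omega) (by omega)
              have h2 := combZ_L1 h3
              rw [show 2 * k' + 1 = r by omega] at h2
              omega
          rw [show 2 * k' + ((0 : Nat) : Int) = 2 * k' by push_cast; ring]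
          simp [rowT, hne]
        have e2 : colS n k' 2 = 0 + rowT n (2 * k' + ((0 : Nat) : Int)) k'
            + rowT n (2 * k' + ((1 : Nat) : Int)) k' := rfl
        rw [e2, hmid, show 2 * k' + ((1 : Nat) : Int) = r by push_cast; omega]
        ring
    · rw [if_neg hret, hcnt]
      rw [hfdr] at hret
      have hrpos : (0 : Int) < r := by omega
      have h2k'2 : 2 * k' + 2 ≤ r := by omega
      have hCge : n ≤ C' := by
        rcases hexit with h | h
        · exact h
        · rw [hfdr] at h; omega
      have hC'' : PySem.Int.floordiv (C' * (r - k')) r = combZ (r - 1) k' := by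
        rw [PySem.Int.floordiv_eq_ediv_of_pos hrpos, hC', combZ_row (by omega) (by omega)]
        exact Int.mul_ediv_cancel _ (by omega)
      have hJ3'' : ∀ j, 2 ≤ j → j < k' → combZ (r - 1) j < n := fun j h2 hj =>
        lt_of_le_of_lt (combZ_r_mono (by omega)) (hJ3' j h2 hj)
      rw [ih _ k' (r - 1) _ hC'' (by omega) (by omega) (by omega) hJ3'' (by omega)]
      -- remaining: cnt + rowT n r k' + remW n (r-1) k' c₂ = cnt + remW n r k c
      have hk'n2 : k' ≤ n / 2 - 1 := by omega
      have hcsplit : ((PySem.Int.floordiv n 2 - k + 1).toNat)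
          = (k' - k).toNat + ((n / 2 - k').toNat + 1) := by rw [hfdn]; omega
      have hcsplit2 : ((PySem.Int.floordiv n 2 - k' + 1).toNat) = (n / 2 - k').toNat + 1 := by
        rw [hfdn]; omega
      rw [hcsplit, hcsplit2, remW_drop (fun j hj => hdropcol j (by omega)),
        show k + (((k' - k).toNat : Nat) : Int) = k' by omega, remW, remW]
      have htail : remW n r (k' + 1) ((n / 2 - k').toNat) =
          remW n (r - 1) (k' + 1) ((n / 2 - k').toNat) := by
        refine remW_top_all (fun j hj hle => ?_)
        have hgt : combZ r k' < combZ r (k' + 1 + (j : Int)) :=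
          combZ_k_strict (by omega) (by omega) hle
        have hne : combZ r (k' + 1 + (j : Int)) ≠ n := by omega
        simp [rowT, hne]
      rw [colS_top (by omega : 2 * k' ≤ r), htail]
      ring

-- ---- B's binary search finds the least row with comb(row, k) ≥ n ----

theorem bsearchB_spec (n k : Int) (hk : 1 ≤ k) : ∀ (fuel : Nat) (lo hi : Int), k ≤ lo →
    lo ≤ hi → n ≤ combZ hi k → (hi - lo).toNat < fuel →
    lo ≤ bsearchB n k lo hi fuel ∧ bsearchB n k lo hi fuel ≤ hi ∧
    n ≤ combZ (bsearchB n k lo hi fuel) k ∧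
    (∀ r', lo ≤ r' → r' < bsearchB n k lo hi fuel → combZ r' k < n) := by
  intro fuel
  induction fuel with
  | zero => intro lo hi _ _ _ hf; omega
  | succ f ih =>
    intro lo hi hklo hlohi hhi hf
    have e0 : bsearchB n k lo hi (f + 1)
        = if lo < hi then
            if combZ (PySem.Int.floordiv (lo + hi) 2) k < n then
              bsearchB n k (PySem.Int.floordiv (lo + hi) 2 + 1) hi f
            else
              bsearchB n k lo (PySem.Int.floordiv (lo + hi) 2) f
          else lo := rfl
    by_cases h : lo < hi
    · have hmb := PySem.Int.floordiv_two_mid_bounds (le_of_lt h)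
      have hmlt : PySem.Int.floordiv (lo + hi) 2 < hi := by
        rw [PySem.Int.floordiv_lt_iff_lt_mul (by norm_num : (0 : Int) < 2)]
        omega
      by_cases hc : combZ (PySem.Int.floordiv (lo + hi) 2) k < n
      · have e : bsearchB n k lo hi (f + 1)
            = bsearchB n k (PySem.Int.floordiv (lo + hi) 2 + 1) hi f := by
          rw [e0, if_pos h, if_pos hc]
        obtain ⟨hb1, hb2, hb3, hb4⟩ :=
          ih (PySem.Int.floordiv (lo + hi) 2 + 1) hi (by omega) (by omega) hhi (by omega)
        rw [e]
        refine ⟨by omega, hb2, hb3, fun r' h1 h2 => ?_⟩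
        rcases (by omega : r' ≤ PySem.Int.floordiv (lo + hi) 2 ∨
            PySem.Int.floordiv (lo + hi) 2 + 1 ≤ r') with hr | hr
        · exact lt_of_le_of_lt (combZ_r_mono hr) hc
        · exact hb4 r' hr h2
      · have e : bsearchB n k lo hi (f + 1)
            = bsearchB n k lo (PySem.Int.floordiv (lo + hi) 2) f := by
          rw [e0, if_pos h, if_neg hc]
        obtain ⟨hb1, hb2, hb3, hb4⟩ :=
          ih lo (PySem.Int.floordiv (lo + hi) 2) hklo (by omega) (by omega) (by omega)
        rw [e]
        exact ⟨hb1, by omega, hb3, hb4⟩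
    · have e : bsearchB n k lo hi (f + 1) = lo := by rw [e0, if_neg h]
      have : lo = hi := by omega
      subst this
      rw [e]
      exact ⟨le_refl _, le_refl _, hhi, fun r' h1 h2 => by omega⟩

-- ---- B's per-column loop counts the weighted solutions in columns ≥ k ----

theorem loopB_spec (n : Int) (hn : 8 ≤ n) : ∀ (fuel : Nat) (k cnt : Int), 2 ≤ k →
    (n - k).toNat < fuel →
    loopB n k cnt fuel = cnt + remW n n k ((PySem.Int.floordiv n 2 - k + 1).toNat) := by
  have hfdn : PySem.Int.floordiv n 2 = n / 2 := PySem.Int.floordiv_eq_ediv_of_pos (by norm_num)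
  intro fuel
  induction fuel with
  | zero => intro k cnt _ hf; omega
  | succ f ih =>
    intro k cnt hk2 hf
    have e0 : loopB n k cnt (f + 1)
        = if combZ (2 * k) k ≤ n then
            loopB n (k + 1)
              (if combZ (bsearchB n k (2 * k) n ((n - 2 * k).toNat + 1)) k = n then
                 cnt + (if bsearchB n k (2 * k) n ((n - 2 * k).toNat + 1) = 2 * k then (1 : Int)
                   else 2)
               else cnt)
              f
          else cnt := rfl
    by_cases hg : combZ (2 * k) k ≤ n
    · have h2k : 2 * k ≤ n := by
        have h1 : combZ (2 * k) 1 = 2 * k := combZ_one (by omega)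
        have h2 : combZ (2 * k) 1 ≤ combZ (2 * k) k := combZ_k_mono (by omega) (by omega) (by omega)
        omega
      have hn2 : n ≤ combZ n 2 := by
        have h2 := combZ_two (show (0 : Int) ≤ n by omega)
        nlinarith
      have hnk : n ≤ combZ n k := le_trans hn2 (combZ_k_mono (by omega) hk2 h2k)
      obtain ⟨hb1, hb2, hb3, hb4⟩ := bsearchB_spec n k (by omega) ((n - 2 * k).toNat + 1)
        (2 * k) n (by omega) h2k hnk (by omega)
      have e : loopB n k cnt (f + 1)
          = loopB n (k + 1) (cnt + rowT n (bsearchB n k (2 * k) n ((n - 2 * k).toNat + 1)) k) f := by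
        rw [e0, if_pos hg]
        congr 1
        unfold rowT
        split_ifs <;> ring
      rw [e, ih (k + 1) _ (by omega) (by omega)]
      have hcol : colS n k ((n - 2 * k + 1).toNat)
          = rowT n (bsearchB n k (2 * k) n ((n - 2 * k).toNat + 1)) k := by
        refine colS_single (x := bsearchB n k (2 * k) n ((n - 2 * k).toNat + 1)) hb1
          (by push_cast; omega) (fun r' h1 h2 h3 => ?_)
        rcases (by omega : r' < bsearchB n k (2 * k) n ((n - 2 * k).toNat + 1) ∨
            bsearchB n k (2 * k) n ((n - 2 * k).toNat + 1) < r') with hr | hr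
        · have := hb4 r' h1 hr
          simp [rowT, this.ne]
        · have hgt : combZ (bsearchB n k (2 * k) n ((n - 2 * k).toNat + 1)) k < combZ r' k :=
            combZ_r_strict (by omega) (by omega) hr
          simp [rowT, show combZ r' k ≠ n by omega]
      rw [hfdn]
      have hsucc : ((n / 2 : Int) - k + 1).toNat = ((n / 2 : Int) - (k + 1) + 1).toNat + 1 := by
        omega
      rw [hsucc, remW, hcol]
      ring
    · rw [e0, if_neg hg]
      have hzero : remW n n k ((PySem.Int.floordiv n 2 - k + 1).toNat) = 0 := by
        refine remW_zero (fun j hj => colS_zero (fun i hi => ?_))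
        have hle1 : combZ (2 * k) k ≤ combZ (2 * (k + (j : Int))) (k + (j : Int)) :=
          combZ_central_mono (by omega) (by omega)
        have hle2 : combZ (2 * (k + (j : Int))) (k + (j : Int)) ≤
            combZ (2 * (k + (j : Int)) + (i : Int)) (k + (j : Int)) := combZ_r_mono (by omega)
        have hne : combZ (2 * (k + (j : Int)) + (i : Int)) (k + (j : Int)) ≠ n := by omega
        simp [rowT, hne]
      rw [hzero]
      ring

-- ---- rows above A's starting row hold no solutions, so both counts agree ----

theorem remW_ext {n r r' k : Int} {c : Nat} (hrr : r ≤ r')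
    (h : ∀ (j : Nat) (x : Int), j < c → r < x → x ≤ r' → 2 * (k + (j : Int)) ≤ x →
      rowT n x (k + (j : Int)) = 0) :
    remW n r' k c = remW n r k c := by
  induction c generalizing k with
  | zero => rfl
  | succ d ih =>
    have hcol : colS n k ((r' - 2 * k + 1).toNat) = colS n k ((r - 2 * k + 1).toNat) := by
      refine colS_ext (by omega) (fun i h1 h2 => ?_)
      have := h 0 (2 * k + (i : Int)) (by omega) (by omega) (by omega) (by push_cast; omega)
      rw [show k + ((0 : Nat) : Int) = k by push_cast; ring] at this
      exact this
    have htail : remW n r' (k + 1) d = remW n r (k + 1) d := by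
      refine ih (fun j x hj hx1 hx2 hx3 => ?_)
      have := h (j + 1) x (by omega) hx1 hx2
        (by rw [show k + (((j + 1 : Nat)) : Int) = k + 1 + (j : Int) by push_cast; ring]; exact hx3)
      rw [show k + (((j + 1 : Nat)) : Int) = k + 1 + (j : Int) by push_cast; ring] at this
      exact this
    rw [remW, remW, hcol, htail]

theorem A003016_main_ge8 (n : Int) (hn : 8 ≤ n) : A003016 n = A003016_alt n := by
  have hcast : (((2 * n).toNat : ℕ) : Int) = 2 * n := by omega
  have hs0 : 0 ≤ isqrtZ (2 * n) := Int.natCast_nonneg _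
  have hs1 : isqrtZ (2 * n) * isqrtZ (2 * n) ≤ 2 * n := by
    have h1 := Nat.sqrt_le' (2 * n).toNat
    have h2 : ((Nat.sqrt (2 * n).toNat ^ 2 : ℕ) : Int) ≤ (((2 * n).toNat : ℕ) : Int) := by
      exact_mod_cast h1
    rw [hcast] at h2
    unfold isqrtZ
    push_cast at h2 ⊢
    nlinarith [h2]
  have hs2 : 2 * n < (isqrtZ (2 * n) + 1) * (isqrtZ (2 * n) + 1) := by
    have h1 := Nat.lt_succ_sqrt' (2 * n).toNat
    have h2 : (((2 * n).toNat : ℕ) : Int) < ((Nat.sqrt (2 * n).toNat).succ ^ 2 : ℕ) := by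
      exact_mod_cast h1
    rw [hcast] at h2
    unfold isqrtZ
    push_cast at h2 ⊢
    nlinarith [h2]
  set s := isqrtZ (2 * n) with hsdef
  have hsge : 4 ≤ s := by nlinarith
  have hsn : s + 1 ≤ n := by
    by_contra hc
    have h1 : n * n ≤ s * s := by nlinarith
    have h2 : 8 * n ≤ n * n := by nlinarith
    linarith
  -- A's side: the sweep counts all solutions with row ≤ s + 1
  rw [A003016, if_neg (by omega : ¬ n < 4)]
  have hC0 : PySem.Int.floordiv ((s + 1) * ((s + 1) - 1)) 2 = combZ (s + 1) 2 := by
    rw [PySem.Int.floordiv_eq_ediv_of_pos (by norm_num : (0 : Int) < 2),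
      ← combZ_two (show (0 : Int) ≤ s + 1 by omega), mul_comm]
    exact Int.mul_ediv_cancel _ (by norm_num)
  rw [outerA_spec n hn ((s + 1).toNat + 1) 2 2 (s + 1) _ hC0 (by norm_num) (by omega) (by omega)
    (fun k' h1 h2 => by omega) (by omega)]
  -- B's side: the per-column search counts all solutions with row ≤ n
  rw [A003016_alt, if_neg (by omega : ¬ n < 0), if_neg (by omega : ¬ n < 4),
    loopB_spec n hn (n.toNat + 1) 2 2 (by norm_num) (by omega)]
  congr 1
  refine Eq.symm (remW_ext hsn (fun j x hj hx1 hx2 hx3 => ?_))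
  have h2j : (2 : Int) ≤ 2 + (j : Int) := by omega
  have hx2le : combZ x 2 ≤ combZ x (2 + (j : Int)) := combZ_k_mono (by norm_num) h2j hx3
  have hgt : n < combZ x 2 := by
    have he := combZ_two (show (0 : Int) ≤ x by omega)
    have hxx : (s + 2) * (s + 1) ≤ x * (x - 1) := by nlinarith
    nlinarith
  have hne : combZ x (2 + (j : Int)) ≠ n := by omega
  simp [rowT, hne]

theorem nat_sqrt_eval {m v : ℕ} (h1 : v * v ≤ m) (h2 : m < (v + 1) * (v + 1)) :
    Nat.sqrt m = v := by
  have a : v ≤ Nat.sqrt m := Nat.le_sqrt.mpr h1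
  have b : Nat.sqrt m < v + 1 := Nat.sqrt_lt.mpr h2
  omega

-- ---- evaluation of the four small cases 4 ≤ n ≤ 7 (A's sweep returns immediately) ----

theorem A003016_small4 : A003016 4 = A003016_alt 4 := by
  have hs : isqrtZ (2 * 4) = 2 := by
    unfold isqrtZ
    rw [show ((2 * (4 : Int)).toNat) = 8 by decide, nat_sqrt_eval (v := 2) (by norm_num) (by norm_num)]
    norm_num
  rw [A003016, if_neg (by decide), hs]
  decide

theorem A003016_small5 : A003016 5 = A003016_alt 5 := by
  have hs : isqrtZ (2 * 5) = 3 := by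
    unfold isqrtZ
    rw [show ((2 * (5 : Int)).toNat) = 10 by decide, nat_sqrt_eval (v := 3) (by norm_num) (by norm_num)]
    norm_num
  rw [A003016, if_neg (by decide), hs]
  decide

theorem A003016_small6 : A003016 6 = A003016_alt 6 := by
  have hs : isqrtZ (2 * 6) = 3 := by
    unfold isqrtZ
    rw [show ((2 * (6 : Int)).toNat) = 12 by decide, nat_sqrt_eval (v := 3) (by norm_num) (by norm_num)]
    norm_num
  rw [A003016, if_neg (by decide), hs]
  decide

theorem A003016_small7 : A003016 7 = A003016_alt 7 := by
  have hs : isqrtZ (2 * 7) = 3 := by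
    unfold isqrtZ
    rw [show ((2 * (7 : Int)).toNat) = 14 by decide, nat_sqrt_eval (v := 3) (by norm_num) (by norm_num)]
    norm_num
  rw [A003016, if_neg (by decide), hs]
  decide

-- ===== VERDICT (by name: the statement is the Claim_ definition above) =====
theorem A003016_spec : Claim_unchanged_A003016 := by
  intro n _ hpre
  unfold Spec_A003016
  intro hD
  unfold Pre_A003016 at hpre
  unfold D_A003016 at hD
  rcases (by omega : n = -4 ∨ (0 ≤ n ∧ n ≤ 3) ∨ (4 ≤ n ∧ n ≤ 7) ∨ 8 ≤ n) with h | h | h | h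
  · subst h; decide
  · have : n = 0 ∨ n = 1 ∨ n = 2 ∨ n = 3 := by omega
    rcases this with h | h | h | h <;> subst h <;> decide
  · have : n = 4 ∨ n = 5 ∨ n = 6 ∨ n = 7 := by omega
    rcases this with h | h | h | h <;> subst h
    · exact A003016_small4
    · exact A003016_small5
    · exact A003016_small6
    · exact A003016_small7
  · exact A003016_main_ge8 n h

theorem A003016_changed : Claim_changed_A003016 := by unfold Claim_changed_A003016; decide

theorem A003016_tight : Claim_exact_A003016 := by
  intro n _ _ hD
  unfold D_A003016 at hD
  have : n = -3 ∨ n = -2 ∨ n = -1 := by omega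
  rcases this with h | h | h <;> subst h <;> decide
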